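-- pv_equiv track=rewrite | github.com/carloscosta2025086-web/WootFlow | main_desktop.py | _find_installer_asset
-- ===== SOURCE A (Python) =====
-- def _find_installer_asset(assets):
--     """Find setup installer asset in release artifacts."""
--     preferred = {"wootflow-setup.exe", "wootflowsetup.exe"}
--
--     for asset in assets:
--         name = (asset.get("name") or "").strip().lower()
--         if name in preferred:
--             return asset
--
--     for asset in assets:
--         name = (asset.get("name") or "").strip().lower()
--         if name.endswith(".exe") and "wootflow" in name and "setup" in name:
--             return asset
--
--     return None
-- ===== SOURCE B (Python) =====
-- def _find_installer_asset(assets):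
--     """Find setup installer asset in release artifacts (single pass)."""
--     preferred = {"wootflow-setup.exe", "wootflowsetup.exe"}
--     fallback = None
--     for asset in assets:
--         name = (asset.get("name") or "").strip().lower()
--         if name in preferred:
--             return asset
--         if fallback is None and name.endswith(".exe") and "wootflow" in name and "setup" in name:
--             fallback = asset
--     return fallback
-- ===== Notes on version B (the rewrite author's own statement) =====
-- stated objective: simpler
-- what changed: Replaces A's two sequential scans (exact-name pass, then fallback-pattern pass) by a single loop that returns immediately on a preferred name and records the first fallback candidate in an accumulator, returned after the loop.
import Mathlib
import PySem

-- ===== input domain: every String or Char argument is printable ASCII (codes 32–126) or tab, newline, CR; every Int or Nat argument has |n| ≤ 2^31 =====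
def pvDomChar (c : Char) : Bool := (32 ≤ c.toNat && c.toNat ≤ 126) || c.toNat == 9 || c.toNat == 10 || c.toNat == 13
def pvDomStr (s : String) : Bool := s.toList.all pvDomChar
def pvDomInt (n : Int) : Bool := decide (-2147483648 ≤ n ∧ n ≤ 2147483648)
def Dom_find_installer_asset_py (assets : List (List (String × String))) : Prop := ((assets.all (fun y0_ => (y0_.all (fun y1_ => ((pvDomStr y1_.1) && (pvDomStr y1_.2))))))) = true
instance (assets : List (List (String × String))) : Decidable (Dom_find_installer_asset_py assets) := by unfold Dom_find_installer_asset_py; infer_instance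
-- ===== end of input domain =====

-- B merges A's two sequential scans into one pass that records the first fallback candidate; same return value.

-- ===== PORT A =====
-- name = (asset.get("name") or "").strip().lower()  ('or ""' coincides with a default of "" since "" is falsy)
def pvName (asset : List (String × String)) : String :=
  PySem.Str.lower (PySem.Str.strip ((PySem.Dict.mk asset).getD "name" ""))

def pvPreferred (name : String) : Bool :=
  name == "wootflow-setup.exe" || name == "wootflowsetup.exe"

def pvFallbackP (name : String) : Bool :=
  PySem.Str.endswith name ".exe" && PySem.Str.isIn "wootflow" name && PySem.Str.isIn "setup" name

def find_installer_asset_py (assets : List (List (String × String))) : Option (List (String × String)) :=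
  match assets.find? (fun asset => pvPreferred (pvName asset)) with
  | some asset => some asset
  | none =>
    match assets.find? (fun asset => pvFallbackP (pvName asset)) with
    | some asset => some asset
    | none => none

-- ===== PORT B =====
def pvAltLoop : List (List (String × String)) → Option (List (String × String)) → Option (List (String × String))
  | [], fallback => fallback
  | asset :: rest, fallback =>
    let name := pvName asset
    if pvPreferred name then some asset
    else pvAltLoop rest (if fallback.isNone && pvFallbackP name then some asset else fallback)

def find_installer_asset_py_alt (assets : List (List (String × String))) : Option (List (String × String)) :=
  pvAltLoop assets none

-- ===== PRECONDITION & SPEC =====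
def Spec_find_installer_asset_py (assets : List (List (String × String))) (out : Option (List (String × String))) : Prop := out = find_installer_asset_py_alt assets
instance (assets : List (List (String × String))) (out : Option (List (String × String))) : Decidable (Spec_find_installer_asset_py assets out) := by unfold Spec_find_installer_asset_py; infer_instance

-- ===== CLAIM (what is proved, stated in full; the proofs are below) =====
def Claim_equal_find_installer_asset_py : Prop := ∀ (assets : List (List (String × String))), Dom_find_installer_asset_py assets → Spec_find_installer_asset_py assets (find_installer_asset_py assets)

-- ===== LEMMAS AND PROOFS =====

-- the single-pass loop equals: first preferred match, else the recorded fallback, else first fallback match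
theorem pvAltLoop_eq (l : List (List (String × String))) (fb : Option (List (String × String))) :
    pvAltLoop l fb =
      match l.find? (fun a => pvPreferred (pvName a)) with
      | some a => some a
      | none =>
        match fb with
        | some x => some x
        | none => l.find? (fun a => pvFallbackP (pvName a)) := by
  induction l generalizing fb with
  | nil => cases fb <;> simp [pvAltLoop]
  | cons a rest ih =>
    by_cases hp : pvPreferred (pvName a)
    · simp [pvAltLoop, List.find?, hp]
    · cases fb with
      | some x => simp [pvAltLoop, List.find?, hp, ih]
      | none =>
        by_cases hf : pvFallbackP (pvName a)
        · simp only [pvAltLoop, hp, Option.isNone_none, Bool.true_and, hf, if_true, ih]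
          simp [List.find?, hp, hf]
        · simp only [pvAltLoop, hp, Option.isNone_none, Bool.true_and, hf, ih]
          simp [List.find?, hp, hf]

-- ===== VERDICT (by name: the statement is the Claim_ definition above) =====
theorem find_installer_asset_py_spec : Claim_equal_find_installer_asset_py := by
  intro assets _
  show find_installer_asset_py assets = find_installer_asset_py_alt assets
  unfold find_installer_asset_py find_installer_asset_py_alt
  rw [pvAltLoop_eq]
  cases assets.find? (fun a => pvPreferred (pvName a)) <;> simp <;>
    cases assets.find? (fun a => pvFallbackP (pvName a)) <;> rfl
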